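-- pv_equiv track=rewrite | github.com/TheTomcat/AdventOfCode | year_2020/day_10_2020.py | count
-- ===== SOURCE A (Python) =====
-- def count(adaptors):
--     counter=0
--     expected_value = 0
--     runs = []
--     for node in adaptors:
--         if node == expected_value:
--             counter += 1
--             expected_value += 1
--         else:
--             runs.append(counter)
--             counter = 1
--             expected_value = node+1
--     return runs
-- ===== SOURCE B (Python) =====
-- def count(adaptors):
--     breaks = [0]
--     prev = -1
--     for i, node in enumerate(adaptors):
--         if node != prev + 1:
--             breaks.append(i)
--         prev = node
--     return [b - a for a, b in zip(breaks, breaks[1:])]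
-- ===== Notes on version B (the rewrite author's own statement) =====
-- stated objective: alternative
-- what changed: B records break indices (where node != prev+1) in one pass and returns successive differences of that index list, instead of A's maintained run counter and expected-value state.
import Mathlib
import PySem

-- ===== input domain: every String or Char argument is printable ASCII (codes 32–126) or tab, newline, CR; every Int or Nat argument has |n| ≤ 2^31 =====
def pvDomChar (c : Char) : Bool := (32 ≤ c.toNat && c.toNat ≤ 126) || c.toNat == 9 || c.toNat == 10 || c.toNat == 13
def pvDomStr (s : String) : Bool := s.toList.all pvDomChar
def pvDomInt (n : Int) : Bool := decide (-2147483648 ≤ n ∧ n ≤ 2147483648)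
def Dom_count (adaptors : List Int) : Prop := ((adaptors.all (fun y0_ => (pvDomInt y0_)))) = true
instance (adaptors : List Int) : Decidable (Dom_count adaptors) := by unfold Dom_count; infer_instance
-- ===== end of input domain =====

-- B records break positions and diffs them instead of maintaining a run counter: an alternative decomposition, same cost.

-- ===== PORT A =====
-- A's loop state: (counter, expected_value, runs)
def countAux (ns : List Int) (counter expected : Int) (runs : List Int) : List Int :=
  match ns with
  | [] => runs
  | node :: rest =>
    if node = expected then countAux rest (counter + 1) (expected + 1) runs
    else countAux rest 1 (node + 1) (runs ++ [counter])

def count (adaptors : List Int) : List Int := countAux adaptors 0 0 []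

-- ===== PORT B =====
-- B's loop over enumerate(adaptors): collect break indices into `breaks`
def breaksAux (ns : List Int) (i prev : Int) (breaks : List Int) : List Int :=
  match ns with
  | [] => breaks
  | node :: rest =>
    breaksAux rest (i + 1) node (if node ≠ prev + 1 then breaks ++ [i] else breaks)

-- [b - a for a, b in zip(breaks, breaks[1:])]
def pvDiffs (l : List Int) : List Int := List.zipWith (fun a b => b - a) l (l.drop 1)

def count_alt (adaptors : List Int) : List Int :=
  pvDiffs (breaksAux adaptors 0 (-1) [0])

-- ===== PRECONDITION & SPEC =====
def Spec_count (adaptors : List Int) (out : List Int) : Prop := out = count_alt adaptors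
instance (adaptors : List Int) (out : List Int) : Decidable (Spec_count adaptors out) := by unfold Spec_count; infer_instance

-- ===== CLAIM (what is proved, stated in full; the proofs are below) =====
def Claim_equal_count : Prop := ∀ (adaptors : List Int), Dom_count adaptors → Spec_count adaptors (count adaptors)

-- ===== LEMMAS AND PROOFS =====

theorem pvDiffs_snoc : ∀ (xs : List Int) (b y : Int),
    pvDiffs (xs ++ [b, y]) = pvDiffs (xs ++ [b]) ++ [y - b] := by
  intro xs
  induction xs with
  | nil => intro b y; simp [pvDiffs]
  | cons x t ih =>
    intro b y
    cases t with
    | nil => simp [pvDiffs]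
    | cons c t' =>
      have h1 := ih b y
      simp only [pvDiffs, List.cons_append, List.drop_succ_cons, List.drop_zero,
        List.zipWith] at h1 ⊢
      simp [h1]

theorem inv_count : ∀ (ns : List Int) (i prev : Int) (bs : List Int) (b : Int),
    countAux ns (i - b) (prev + 1) (pvDiffs (bs ++ [b]))
      = pvDiffs (breaksAux ns i prev (bs ++ [b])) := by
  intro ns
  induction ns with
  | nil => intro i prev bs b; simp [countAux, breaksAux]
  | cons node rest ih =>
    intro i prev bs b
    by_cases h : node = prev + 1
    · have hA : countAux (node :: rest) (i - b) (prev + 1) (pvDiffs (bs ++ [b]))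
          = countAux rest (i - b + 1) (prev + 1 + 1) (pvDiffs (bs ++ [b])) := by
        simp [countAux, h]
      have hB : breaksAux (node :: rest) i prev (bs ++ [b])
          = breaksAux rest (i + 1) node (bs ++ [b]) := by
        simp [breaksAux, h]
      subst h
      rw [hA, hB]
      have := ih (i + 1) (prev + 1) bs b
      have harith : i + 1 - b = i - b + 1 := by ring
      rw [harith] at this
      exact this
    · have hA : countAux (node :: rest) (i - b) (prev + 1) (pvDiffs (bs ++ [b]))
          = countAux rest 1 (node + 1) (pvDiffs (bs ++ [b]) ++ [i - b]) := by
        simp [countAux, h]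
      have hB : breaksAux (node :: rest) i prev (bs ++ [b])
          = breaksAux rest (i + 1) node (bs ++ [b] ++ [i]) := by
        simp [breaksAux, h]
      rw [hA, hB]
      have := ih (i + 1) node (bs ++ [b]) i
      have harith : i + 1 - i = (1 : Int) := by ring
      rw [harith] at this
      have hsnoc : pvDiffs (bs ++ [b] ++ [i]) = pvDiffs (bs ++ [b]) ++ [i - b] := by
        have := pvDiffs_snoc bs b i
        simpa using this
      rw [hsnoc] at this
      exact this

-- ===== VERDICT (by name: the statement is the Claim_ definition above) =====
theorem count_spec : Claim_equal_count := by
  intro adaptors _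
  unfold Spec_count count count_alt
  have := inv_count adaptors 0 (-1) [] 0
  simpa [pvDiffs] using this
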